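-- pv_equiv track=rewrite | github.com/Dashora7/icvf_subgoals | src/bridge/tasks/toykitchen_pickplace_dataset.py | include_tasks
-- ===== SOURCE A (Python) =====
-- def include_tasks(paths, included_tasks):
--     new_paths = []
--     for d in paths:
--         accept = False
--         for exdir in included_tasks:
--             if exdir in d:
--                 accept = True
--                 break
--         if accept:
--             new_paths.append(d)
--     return new_paths
-- ===== SOURCE B (Python) =====
-- def include_tasks(paths, included_tasks):
--     # Task-major worklist: each task scans only the still-unmatched paths,
--     # matched indices go into a set; one final pass restores the original order.
--     hit = set()
--     remaining = list(enumerate(paths))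
--     for t in included_tasks:
--         if not remaining:
--             break
--         still = []
--         for i, p in remaining:
--             if t in p:
--                 hit.add(i)
--             else:
--                 still.append((i, p))
--         remaining = still
--     return [p for i, p in enumerate(paths) if i in hit]
-- ===== Notes on version B (the rewrite author's own statement) =====
-- stated objective: alternative
-- what changed: Inverted the loop nesting: instead of scanning all tasks per path with an early break, B sweeps the shrinking worklist of still-unmatched (index, path) pairs once per task, collects matched indices in a set, and rebuilds the answer in original order at the end.
import Mathlib
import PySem

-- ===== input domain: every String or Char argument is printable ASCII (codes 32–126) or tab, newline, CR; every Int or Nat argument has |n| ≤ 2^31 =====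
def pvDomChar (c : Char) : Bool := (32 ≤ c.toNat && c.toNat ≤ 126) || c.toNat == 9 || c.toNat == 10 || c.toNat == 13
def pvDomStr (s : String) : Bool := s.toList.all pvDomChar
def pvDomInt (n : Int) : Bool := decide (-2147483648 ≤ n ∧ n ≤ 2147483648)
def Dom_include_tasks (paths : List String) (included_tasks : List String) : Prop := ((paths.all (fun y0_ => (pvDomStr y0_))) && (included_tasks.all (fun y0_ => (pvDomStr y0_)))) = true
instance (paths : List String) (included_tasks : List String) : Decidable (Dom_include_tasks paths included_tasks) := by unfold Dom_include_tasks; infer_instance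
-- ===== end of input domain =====

-- B changes the structure (task-major sweep over a shrinking worklist of unmatched
-- paths, with a set of matched indices) instead of A's path-major scan with break;
-- same result, same worst-case cost.

-- ===== PORT A =====
-- inner 'for exdir in included_tasks: if exdir in d: accept = True; break'
def include_tasks_accept (included_tasks : List String) (d : String) : Bool :=
  match included_tasks with
  | [] => false
  | exdir :: rest => if PySem.Str.isIn exdir d then true else include_tasks_accept rest d

def include_tasks (paths : List String) (included_tasks : List String) : List String :=
  paths.foldl (fun new_paths d =>
    if include_tasks_accept included_tasks d then new_paths ++ [d] else new_paths) []

-- ===== PORT B =====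
-- inner 'for i, p in remaining: if t in p: hit.add(i) else: still.append((i, p))'
def include_tasks_pass (t : String) (remaining : List (Int × String))
    (acc : PySem.Set Int × List (Int × String)) : PySem.Set Int × List (Int × String) :=
  remaining.foldl (fun acc ip =>
    if PySem.Str.isIn t ip.2 then (PySem.Set.add acc.1 ip.1, acc.2)
    else (acc.1, acc.2 ++ [ip])) acc

-- outer 'for t in included_tasks: if not remaining: break; …'
def include_tasks_loop (included_tasks : List String) (hit : PySem.Set Int)
    (remaining : List (Int × String)) : PySem.Set Int :=
  match included_tasks with
  | [] => hit
  | t :: rest =>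
    if remaining.isEmpty then hit
    else
      let r := include_tasks_pass t remaining (hit, [])
      include_tasks_loop rest r.1 r.2

def include_tasks_alt (paths : List String) (included_tasks : List String) : List String :=
  let hit := include_tasks_loop included_tasks PySem.Set.empty (PySem.List.enumerate paths 0)
  ((PySem.List.enumerate paths 0).filter (fun ip => PySem.Set.contains hit ip.1)).map
    (fun ip => ip.2)

-- ===== PRECONDITION & SPEC =====
def Spec_include_tasks (paths : List String) (included_tasks : List String) (out : List String) : Prop := out = include_tasks_alt paths included_tasks
instance (paths : List String) (included_tasks : List String) (out : List String) : Decidable (Spec_include_tasks paths included_tasks out) := by unfold Spec_include_tasks; infer_instance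

-- ===== CLAIM (what is proved, stated in full; the proofs are below) =====
def Claim_equal_include_tasks : Prop := ∀ (paths : List String) (included_tasks : List String), Dom_include_tasks paths included_tasks → Spec_include_tasks paths included_tasks (include_tasks paths included_tasks)

-- ===== LEMMAS AND PROOFS =====

-- A's inner break-loop is List.any
lemma accept_eq_any (ts : List String) (d : String) :
    include_tasks_accept ts d = ts.any (fun t => PySem.Str.isIn t d) := by
  induction ts with
  | nil => rfl
  | cons t r ih =>
    simp only [include_tasks_accept, List.any_cons]
    split_ifs with h
    · simp only [h, Bool.true_or]
    · simp only [Bool.not_eq_true] at h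
      simp only [h, Bool.false_or, ih]

-- A = filter
lemma include_tasks_eq_filter (paths ts : List String) :
    include_tasks paths ts = paths.filter (fun d => ts.any (fun t => PySem.Str.isIn t d)) := by
  unfold include_tasks
  rw [PySem.List.foldl_append_if_eq_filter]
  simp only [List.nil_append]
  exact List.filter_congr (fun d _ => accept_eq_any ts d)

-- membership in the set produced by one pass over the worklist
lemma pass_fst_mem (t : String) (rem : List (Int × String)) (hit : PySem.Set Int)
    (s : List (Int × String)) (j : Int) :
    j ∈ (include_tasks_pass t rem (hit, s)).1
      ↔ j ∈ hit ∨ ∃ ip ∈ rem, PySem.Str.isIn t ip.2 = true ∧ ip.1 = j := by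
  induction rem generalizing hit s with
  | nil => simp [include_tasks_pass]
  | cons ip r ih =>
    simp only [include_tasks_pass, List.foldl_cons] at *
    by_cases hm : PySem.Str.isIn t ip.2 = true
    · simp only [hm, if_true, ih, PySem.Set.mem_add, List.mem_cons]
      constructor
      · rintro ((h | h) | ⟨q, hq, h1, h2⟩)
        · exact Or.inl h
        · exact Or.inr ⟨ip, Or.inl rfl, hm, h.symm⟩
        · exact Or.inr ⟨q, Or.inr hq, h1, h2⟩
      · rintro (h | ⟨q, (rfl | hq), h1, h2⟩)
        · exact Or.inl (Or.inl h)
        · exact Or.inl (Or.inr h2.symm)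
        · exact Or.inr ⟨q, hq, h1, h2⟩
    · simp only [hm, ih, List.mem_cons]
      constructor
      · rintro (h | ⟨q, hq, h1, h2⟩)
        · exact Or.inl h
        · exact Or.inr ⟨q, Or.inr hq, h1, h2⟩
      · rintro (h | ⟨q, (rfl | hq), h1, h2⟩)
        · exact Or.inl h
        · exact absurd h1 hm
        · exact Or.inr ⟨q, hq, h1, h2⟩

-- the worklist after one pass: the non-matching pairs, in order
lemma pass_snd (t : String) (rem : List (Int × String)) (hit : PySem.Set Int)
    (s : List (Int × String)) :
    (include_tasks_pass t rem (hit, s)).2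
      = s ++ rem.filter (fun ip => !PySem.Str.isIn t ip.2) := by
  induction rem generalizing hit s with
  | nil => simp [include_tasks_pass]
  | cons ip r ih =>
    simp only [include_tasks_pass, List.foldl_cons] at *
    by_cases hm : PySem.Str.isIn t ip.2 = true
    · rw [if_pos hm, ih, List.filter_cons]
      have h2 : (!PySem.Str.isIn t ip.2) = false := by rw [hm]; rfl
      rw [h2]
      simp only [Bool.false_eq_true, if_false]
    · rw [if_neg hm, ih, List.filter_cons]
      have h2 : (!PySem.Str.isIn t ip.2) = true := by
        cases h : PySem.Str.isIn t ip.2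
        · rfl
        · exact absurd h hm
      rw [h2]
      simp only [if_true]
      simp

-- the loop never loses already-collected indices
lemma loop_mono (ts : List String) (hit : PySem.Set Int) (rem : List (Int × String))
    (j : Int) (hj : j ∈ hit) : j ∈ include_tasks_loop ts hit rem := by
  induction ts generalizing hit rem with
  | nil => exact hj
  | cons t rest ih =>
    simp only [include_tasks_loop]
    split_ifs with h
    · exact hj
    · exact ih _ _ ((pass_fst_mem t rem hit [] j).2 (Or.inl hj))

-- the loop collects exactly the indices whose path matches some task
lemma loop_mem (ts : List String) (hit : PySem.Set Int) (rem : List (Int × String))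
    (i : Int) (p : String) (hrem : (i, p) ∈ rem) (hnd : (rem.map Prod.fst).Nodup) :
    i ∈ include_tasks_loop ts hit rem
      ↔ (i ∈ hit ∨ ts.any (fun t => PySem.Str.isIn t p) = true) := by
  induction ts generalizing hit rem with
  | nil => simp [include_tasks_loop]
  | cons t rest ih =>
    have hne : rem.isEmpty = false := by
      cases rem with
      | nil => simp at hrem
      | cons x xs => rfl
    simp only [include_tasks_loop, hne, Bool.false_eq_true, if_false, List.any_cons]
    by_cases hm : PySem.Str.isIn t p = true
    · have hin : i ∈ (include_tasks_pass t rem (hit, [])).1 :=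
        (pass_fst_mem t rem hit [] i).2 (Or.inr ⟨(i, p), hrem, hm, rfl⟩)
      have hloop := loop_mono rest _ (include_tasks_pass t rem (hit, [])).2 i hin
      have hor : (PySem.Str.isIn t p || rest.any fun t => PySem.Str.isIn t p) = true := by
        rw [hm, Bool.true_or]
      exact iff_of_true hloop (Or.inr hor)
    · have hm' : PySem.Str.isIn t p = false := by
        cases h : PySem.Str.isIn t p
        · rfl
        · exact absurd h hm
      have hrem' : (i, p) ∈ (include_tasks_pass t rem (hit, [])).2 := by
        rw [pass_snd, List.nil_append, List.mem_filter]
        exact ⟨hrem, by rw [hm']; rfl⟩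
      have hsub : (List.filter (fun ip => !PySem.Str.isIn t ip.2) rem).Sublist rem :=
        List.filter_sublist
      have hnd' : (((include_tasks_pass t rem (hit, [])).2).map Prod.fst).Nodup := by
        rw [pass_snd, List.nil_append]
        exact hnd.sublist (hsub.map Prod.fst)
      rw [ih _ _ hrem' hnd', pass_fst_mem, hm', Bool.false_or]
      constructor
      · rintro ((h | ⟨q, hq, h1, h2⟩) | h)
        · exact Or.inl h
        · -- q and (i,p) share the same first component, so q = (i,p); contradiction
          have : q = (i, p) := by
            have := List.inj_on_of_nodup_map hnd hq hrem
            exact this (by rw [h2])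
          rw [this] at h1
          exact absurd h1 hm
        · exact Or.inr h
      · rintro (h | h)
        · exact Or.inl (Or.inl h)
        · exact Or.inr h

-- indices of enumerate are pairwise distinct
lemma enum_fst_nodup (paths : List String) (s : Int) :
    ((PySem.List.enumerate paths s).map Prod.fst).Nodup := by
  have hp : ((PySem.List.enumerate paths s).map Prod.fst).Pairwise (· < ·) :=
    List.pairwise_map.2 (PySem.List.pairwise_lt_enumerate paths s)
  exact hp.imp (fun h => ne_of_lt h)

-- filtering enumerate by a predicate on the element and dropping indices = plain filter
lemma enum_filter_map (paths : List String) (q : String → Bool) (s : Int) :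
    ((PySem.List.enumerate paths s).filter (fun ip => q ip.2)).map (fun ip => ip.2)
      = paths.filter q := by
  induction paths generalizing s with
  | nil => simp [PySem.List.enumerate_nil]
  | cons p ps ih =>
    rw [PySem.List.enumerate_cons]
    simp only [List.filter_cons]
    by_cases h : q p
    · simp [h, ih]
    · simp only [Bool.not_eq_true] at h
      simp [h, ih]

-- ===== VERDICT (by name: the statement is the Claim_ definition above) =====
theorem include_tasks_spec : Claim_equal_include_tasks := by
  intro paths ts _
  unfold Spec_include_tasks include_tasks_alt
  rw [include_tasks_eq_filter, ← enum_filter_map paths (fun p => ts.any (fun t => PySem.Str.isIn t p)) 0]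
  refine congrArg _ (List.filter_congr ?_)
  intro ip hip
  dsimp only
  have hmem : (ip.1, ip.2) ∈ PySem.List.enumerate paths 0 := by
    rw [Prod.mk.eta]; exact hip
  have hiff := loop_mem ts PySem.Set.empty (PySem.List.enumerate paths 0) ip.1 ip.2 hmem
    (enum_fst_nodup paths 0)
  have hempty : ¬ (ip.1 ∈ (PySem.Set.empty : PySem.Set Int)) := by
    intro h
    cases h
  cases h2 : ts.any (fun t => PySem.Str.isIn t ip.2) with
  | true =>
    have : ip.1 ∈ include_tasks_loop ts PySem.Set.empty (PySem.List.enumerate paths 0) :=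
      hiff.2 (Or.inr h2)
    exact ((PySem.Set.contains_iff _ _).mpr this).symm
  | false =>
    have : ¬ ip.1 ∈ include_tasks_loop ts PySem.Set.empty (PySem.List.enumerate paths 0) := by
      intro hmem'
      rcases hiff.1 hmem' with h | h
      · exact hempty h
      · rw [h2] at h; exact Bool.false_ne_true h
    cases hc : PySem.Set.contains (include_tasks_loop ts PySem.Set.empty (PySem.List.enumerate paths 0)) ip.1
    · rfl
    · exact absurd ((PySem.Set.contains_iff _ _).mp hc) this
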